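-- pv_equiv track=rewrite | github.com/Nishant2294/MY-personal-Code | deliver_sentiment analysis/analyse_tweets.py | group_user_and_tweets
-- ===== SOURCE A (Python) =====
-- def group_user_and_tweets(csv_list):
--     """Used for grouping user and tweets, the result should be like this
--     @abc : [tweet1, tweet2, tweet3]
--     @dbc : [tweet 1, tweet 2, tweet3]
--     """
--     user_tweet_dict = {}
--     existing_users = []
--     for tweet in csv_list:
--         # Check if tweet is a retweet , if yes then ignore
--         if tweet.startswith("RT"):
--             continue
--         elif(tweet.startswith("@")):
--             existing_users += [tweet.split(' ', 1)[0]]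
--
--     for each_user in set(existing_users):
--         user_tweet_list=[]
--         user_name  = each_user.replace("@","")
--         for tweet in csv_list:
--             if tweet.startswith("@") and tweet.split(' ', 1)[0] == each_user :
--                 user_tweet_list.append(tweet)
--                 #user_tweet_dict.update({user_name:tweet})
--         user_tweet_dict.update({user_name:user_tweet_list})
--
--     return user_tweet_dict
-- ===== SOURCE B (Python) =====
-- def group_user_and_tweets(csv_list):
--     """Single pass: group tweets by their leading @token, then strip '@' from keys."""
--     groups = {}
--     for tweet in csv_list:
--         if tweet.startswith("@"):
--             groups.setdefault(tweet.split(' ', 1)[0], []).append(tweet)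
--     return {user.replace("@", ""): tweets for user, tweets in groups.items()}
-- ===== Notes on version B (the rewrite author's own statement) =====
-- stated objective: alternative
-- what changed: Replaces A's rescan of the whole tweet list for every distinct user (and its set-iteration-ordered dict build) by a single pass that appends each @-tweet to a dict keyed by its first token; Pre_ excludes lists in which two distinct leading @-tokens collapse to the same key after removing '@' characters, where A's overwrite winner is decided by Python's arbitrary set iteration order.
-- outside the precondition, e.g. on group_user_and_tweets(['@x@y 1', '@xy 2']): A returns {'xy': ['@x@y 1']}, B returns {'xy': ['@xy 2']}
import Mathlib
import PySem

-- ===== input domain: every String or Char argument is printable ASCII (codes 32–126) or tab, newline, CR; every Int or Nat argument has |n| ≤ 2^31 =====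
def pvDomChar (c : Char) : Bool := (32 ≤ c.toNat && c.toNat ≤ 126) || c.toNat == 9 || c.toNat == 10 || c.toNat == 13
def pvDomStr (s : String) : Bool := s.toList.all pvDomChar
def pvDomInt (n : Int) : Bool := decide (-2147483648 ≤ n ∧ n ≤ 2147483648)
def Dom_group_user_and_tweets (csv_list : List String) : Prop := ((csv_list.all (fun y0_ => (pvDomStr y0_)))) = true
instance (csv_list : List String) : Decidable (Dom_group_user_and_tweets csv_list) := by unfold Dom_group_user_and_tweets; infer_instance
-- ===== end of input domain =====

-- B groups tweets by their leading @-token in one pass over the list instead of rescanning the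
-- whole list once per distinct user; equivalence is about the returned dict only.


-- shared helper: tweet.split(' ', 1)[0] — the list returned by split with a nonempty separator is
-- never empty, so Python's [0] never raises; headI with default "" is exact here
def firstTok (t : String) : String := ((PySem.Str.splitMax? t " " 1).getD []).headI

-- ===== PORT A =====
def group_user_and_tweets (csv_list : List String) : List (String × List String) :=
  -- first loop: collect first tokens of '@'-tweets ('RT'-tweets skipped)
  let existing_users := csv_list.foldl (fun acc tweet =>
      if PySem.Str.startswith tweet "RT" then acc
      else if PySem.Str.startswith tweet "@" then acc ++ [firstTok tweet]
      else acc) []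
  -- second loop: for each distinct user, rescan csv_list; set(existing_users) is modelled as the
  -- distinct elements in first-occurrence order (Python's set order is arbitrary; dict outputs are
  -- compared ignoring order, and Pre_ excludes the key collisions where the order could matter)
  ((PySem.Set.ofList existing_users : List String).foldl (fun d each_user =>
      let user_tweet_list := csv_list.foldl (fun l tweet =>
          if PySem.Str.startswith tweet "@" && (firstTok tweet == each_user) then l ++ [tweet]
          else l) []
      d.insert (PySem.Str.replace each_user "@" "") user_tweet_list) PySem.Dict.empty).items

-- ===== PORT B =====
def group_user_and_tweets_alt (csv_list : List String) : List (String × List String) :=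
  -- one pass: groups.setdefault(token, []).append(tweet) = modify with default []
  let groups := csv_list.foldl (fun d tweet =>
      if PySem.Str.startswith tweet "@" then
        d.modify (firstTok tweet) [] (fun l => l ++ [tweet])
      else d) PySem.Dict.empty
  -- the final dict comprehension {user.replace('@',''): tweets for user, tweets in groups.items()}
  (groups.items.foldl (fun d p => d.insert (PySem.Str.replace p.1 "@" "") p.2)
      PySem.Dict.empty).items

-- ===== PRECONDITION & SPEC =====
-- Pre_ excludes lists in which two distinct leading @-tokens collapse to the same key after
-- removing '@' characters: there A's dict value is decided by Python's arbitrary set iteration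
-- order (both choices defensible), B keeps the last such group.
def Pre_group_user_and_tweets (csv_list : List String) : Prop :=
  ((PySem.Set.ofList ((csv_list.filter (fun t => PySem.Str.startswith t "@")).map firstTok)
      : List String).map (fun u => PySem.Str.replace u "@" "")).Nodup
instance (csv_list : List String) : Decidable (Pre_group_user_and_tweets csv_list) := by
  unfold Pre_group_user_and_tweets; infer_instance

def pvWitness_group_user_and_tweets : List String := ["@a hi", "RT @a x", "@b yo", "@a again", "hello"]

def Spec_group_user_and_tweets (csv_list : List String) (out : List (String × List String)) : Prop := out = group_user_and_tweets_alt csv_list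
instance (csv_list : List String) (out : List (String × List String)) : Decidable (Spec_group_user_and_tweets csv_list out) := by unfold Spec_group_user_and_tweets; infer_instance

-- ===== CLAIM (what is proved, stated in full; the proofs are below) =====
def Claim_equal_group_user_and_tweets : Prop := ∀ (csv_list : List String), Dom_group_user_and_tweets csv_list → Pre_group_user_and_tweets csv_list → Spec_group_user_and_tweets csv_list (group_user_and_tweets csv_list)

-- ===== LEMMAS AND PROOFS =====



-- a tweet starting with '@' does not start with "RT"
lemma at_not_rt (t : String) (h : PySem.Str.startswith t "@" = true) :
    PySem.Str.startswith t "RT" = false := by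
  simp only [PySem.Str.startswith_eq] at *
  rw [PySem.Chars.startswith_iff] at h
  by_contra hrt
  rw [Bool.not_eq_false, PySem.Chars.startswith_iff] at hrt
  obtain ⟨u, hu⟩ := h
  obtain ⟨v, hv⟩ := hrt
  have h1 : ("@" : String).toList = ['@'] := rfl
  have h2 : ("RT" : String).toList = ['R', 'T'] := rfl
  rw [h1] at hu
  rw [h2, ← hu] at hv
  simp at hv

-- A's first loop collects exactly the first tokens of the '@'-tweets, in order
lemma existing_users_eq (csv_list : List String) :
    csv_list.foldl (fun acc tweet =>
        if PySem.Str.startswith tweet "RT" then acc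
        else if PySem.Str.startswith tweet "@" then acc ++ [firstTok tweet]
        else acc) [] =
    ((csv_list.filter (fun t => PySem.Str.startswith t "@")).map firstTok) := by
  have hf : (fun (acc : List String) tweet =>
        if PySem.Str.startswith tweet "RT" then acc
        else if PySem.Str.startswith tweet "@" then acc ++ [firstTok tweet]
        else acc) =
      (fun acc tweet =>
        if PySem.Str.startswith tweet "@" = true then acc ++ [firstTok tweet] else acc) := by
    funext acc tweet
    by_cases h : PySem.Str.startswith tweet "@" = true
    · rw [at_not_rt tweet h]
      simp only [h, Bool.false_eq_true, if_false, if_true]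
    · simp only [Bool.not_eq_true] at h
      by_cases hRT : PySem.Str.startswith tweet "RT" = true
      · simp only [hRT, h, Bool.false_eq_true, if_false, if_true]
      · simp only [Bool.not_eq_true] at hRT
        simp only [hRT, h, Bool.false_eq_true, if_false]
  rw [hf, PySem.List.foldl_append_if (fun t => PySem.Str.startswith t "@") firstTok]
  simp

-- A's inner rescan is a filter
lemma inner_loop_eq (csv_list : List String) (u : String) :
    csv_list.foldl (fun l tweet =>
        if PySem.Str.startswith tweet "@" && (firstTok tweet == u) then l ++ [tweet] else l) [] =
    csv_list.filter (fun t => PySem.Str.startswith t "@" && (firstTok t == u)) := by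
  rw [PySem.List.foldl_append_if (fun t => PySem.Str.startswith t "@" && (firstTok t == u))
        (fun t => t)]
  simp

-- B's single pass, characterised: items of the groups dict
lemma groups_items_eq (csv_list : List String) :
    (csv_list.foldl (fun d tweet =>
        if PySem.Str.startswith tweet "@" then
          d.modify (firstTok tweet) [] (fun l => l ++ [tweet])
        else d) (PySem.Dict.empty : PySem.Dict String (List String))).items =
    (PySem.Set.ofList ((csv_list.filter (fun t => PySem.Str.startswith t "@")).map firstTok)
        : List String).map
      (fun u => (u, csv_list.filter (fun t => PySem.Str.startswith t "@" && (firstTok t == u)))) := by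
  set xs := csv_list.filter (fun t => PySem.Str.startswith t "@") with hxs
  have hfold : (csv_list.foldl (fun d tweet =>
        if PySem.Str.startswith tweet "@" then
          d.modify (firstTok tweet) [] (fun l => l ++ [tweet])
        else d) (PySem.Dict.empty : PySem.Dict String (List String))) =
      xs.foldl (fun d t => d.modify (firstTok t) [] (fun l => l ++ [t])) PySem.Dict.empty := by
    rw [hxs, List.foldl_filter]
  rw [hfold]
  have hkeys : (xs.foldl (fun d t => d.modify (firstTok t) [] (fun l => l ++ [t]))
        (PySem.Dict.empty : PySem.Dict String (List String))).keys =
      (PySem.Set.ofList (xs.map firstTok) : List String) := by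
    rw [PySem.Dict.keys_foldl_modify_key xs firstTok [] (fun _ t => (fun l => l ++ [t]))]
    rfl
  have hnodup : (xs.foldl (fun d t => d.modify (firstTok t) [] (fun l => l ++ [t]))
        (PySem.Dict.empty : PySem.Dict String (List String))).keys.Nodup := by
    apply PySem.Dict.nodup_keys_foldl_modify_key xs firstTok [] (fun _ t => (fun l => l ++ [t]))
    simp [PySem.Dict.empty, PySem.Dict.keys]
  have hgetD : ∀ u, (xs.foldl (fun d t => d.modify (firstTok t) [] (fun l => l ++ [t]))
        (PySem.Dict.empty : PySem.Dict String (List String))).getD u [] =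
      xs.filter (fun t => firstTok t == u) := by
    intro u
    have hmap : xs.foldl (fun d t => d.modify (firstTok t) [] (fun l => l ++ [t]))
          (PySem.Dict.empty : PySem.Dict String (List String)) =
        (xs.map (fun t => (firstTok t, t))).foldl
          (fun d p => d.modify p.1 [] (fun l => l ++ [p.2])) PySem.Dict.empty := by
      rw [List.foldl_map]
    rw [hmap, PySem.Dict.getD_foldl_modify_append]
    have h0 : (PySem.Dict.empty : PySem.Dict String (List String)).getD u [] = [] := rfl
    rw [h0, List.filter_map]
    simp [Function.comp_def]
  rw [PySem.Dict.items_eq_map_keys _ hnodup [], hkeys]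
  apply List.map_congr_left
  intro u _
  rw [hgetD u, hxs, List.filter_filter]
  simp only [Prod.mk.injEq, true_and]
  apply List.filter_congr
  intro t _
  exact Bool.and_comm _ _

theorem group_user_and_tweets_spec : Claim_equal_group_user_and_tweets := by
  intro csv_list _ hpre
  unfold Spec_group_user_and_tweets group_user_and_tweets group_user_and_tweets_alt
  unfold Pre_group_user_and_tweets at hpre
  simp only [existing_users_eq, groups_items_eq]
  set users := (PySem.Set.ofList ((csv_list.filter
      (fun t => PySem.Str.startswith t "@")).map firstTok) : List String) with husers
  -- A's second loop inserts fresh distinct keys (by Pre_), so its items are a map over users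
  have hA : ((users.foldl (fun d each_user =>
        d.insert (PySem.Str.replace each_user "@" "")
          (csv_list.foldl (fun l tweet =>
            if PySem.Str.startswith tweet "@" && (firstTok tweet == each_user) then l ++ [tweet]
            else l) []))
        (PySem.Dict.empty : PySem.Dict String (List String))).items) =
      users.map (fun u => (PySem.Str.replace u "@" "",
        csv_list.foldl (fun l tweet =>
            if PySem.Str.startswith tweet "@" && (firstTok tweet == u) then l ++ [tweet]
            else l) [])) := by
    rw [PySem.Dict.items_foldl_insert_fresh users (fun u => PySem.Str.replace u "@" "") _
          PySem.Dict.empty (by intro a _; rfl) hpre]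
    rfl
  -- B's comprehension also inserts fresh distinct keys (the same keys, by Pre_)
  have hB : (((users.map (fun u => (u, csv_list.filter
          (fun t => PySem.Str.startswith t "@" && (firstTok t == u))))).foldl
        (fun d p => d.insert (PySem.Str.replace p.1 "@" "") p.2)
        (PySem.Dict.empty : PySem.Dict String (List String))).items) =
      (users.map (fun u => (u, csv_list.filter
          (fun t => PySem.Str.startswith t "@" && (firstTok t == u))))).map
        (fun p => (PySem.Str.replace p.1 "@" "", p.2)) := by
    rw [PySem.Dict.items_foldl_insert_fresh _
          (fun p : String × List String => PySem.Str.replace p.1 "@" "")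
          (fun p : String × List String => p.2)
          PySem.Dict.empty (by intro a _; rfl) (by rw [List.map_map]; exact hpre)]
    rfl
  rw [hA, hB, List.map_map]
  apply List.map_congr_left
  intro u _
  rw [inner_loop_eq]
  rfl
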